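-- pv_equiv track=rewrite | github.com/charlessuo/natural-language-processing | text_classification/newsgroups_models/features.py | _strip_footer
-- ===== SOURCE A (Python) =====
-- def _strip_footer(text):
--     '''
--     Given text in "news" format, attempt to remove a signature block.
--     As a rough heuristic, we assume that signatures are set apart by either
--     a blank line or a line made of hyphens, and that it is the last such line
--     in the file (disregarding blank lines at the end).
--     '''
--     lines = text.strip().split('\n')
--     for line_num in reversed(range(len(lines))):
--         line = lines[line_num]
--         if line.strip().strip('-') == '':
--             break
--     if line_num > 0:
--         return '\n'.join(lines[:line_num])
--     else:
--         return text
-- ===== SOURCE B (Python) =====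
-- def _strip_footer(text):
--     # Single forward pass with an accumulator: whenever a separator line is seen
--     # past index 0, overwrite the answer with the prefix joined so far; the last
--     # overwrite wins. No index list, no reverse scan.
--     lines = text.strip().split('\n')
--     out = text
--     prefix = []
--     for i, ln in enumerate(lines):
--         if i > 0 and ln.strip().strip('-') == '':
--             out = '\n'.join(prefix)
--         prefix.append(ln)
--     return out
-- ===== Notes on version B (the rewrite author's own statement) =====
-- stated objective: alternative
-- what changed: Replaces A's reverse scan with early break by a single forward fold carrying (answer, prefix-so-far): each separator line past index 0 overwrites the answer with the prefix joined so far, so the last overwrite wins; nothing is indexed or scanned backwards.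
import Mathlib
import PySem

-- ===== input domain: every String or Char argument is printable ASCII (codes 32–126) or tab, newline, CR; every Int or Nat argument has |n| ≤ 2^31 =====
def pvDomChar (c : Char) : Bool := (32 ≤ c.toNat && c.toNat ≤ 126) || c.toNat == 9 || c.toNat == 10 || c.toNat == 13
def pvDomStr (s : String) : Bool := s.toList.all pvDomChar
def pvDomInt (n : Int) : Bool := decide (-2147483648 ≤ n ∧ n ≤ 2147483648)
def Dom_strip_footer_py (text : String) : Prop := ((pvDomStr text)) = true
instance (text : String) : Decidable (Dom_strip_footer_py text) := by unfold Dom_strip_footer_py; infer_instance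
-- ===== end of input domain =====

-- B replaces A's reverse scan-and-break by one forward fold over the lines with an
-- (answer, prefix) accumulator: each separator past index 0 overwrites the answer.

-- shared line test: line.strip().strip('-') == ''  (this expression appears verbatim in both Pythons)
def pvBlankish (line : String) : Bool :=
  PySem.Str.stripChars (PySem.Str.strip line) "-" == ""

-- text.strip().split('\n'): split? is some for the non-empty separator '\n', so the [] default never fires.
def pvLines (text : String) : List String :=
  (PySem.Str.split? (PySem.Str.strip text) "\n").getD []

-- ===== PORT A =====
-- A's reverse loop: for line_num in reversed(range(len(lines))): if cond: break.
-- lines[line_num] is always in range here, ported as getD (exact on in-range indices).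
-- A break at index 0 and loop exhaustion both leave line_num = 0, hence the single base case.
def pvLoopA (lines : List String) : Nat → Int
  | 0 => 0
  | i+1 => if pvBlankish (lines.getD (i+1) "") then ((i : Int) + 1) else pvLoopA lines i

def strip_footer_py (text : String) : String :=
  let lines := pvLines text
  let line_num := pvLoopA lines (lines.length - 1)
  if line_num > 0 then PySem.Str.join "\n" (PySem.List.slice lines none (some line_num))
  else text

-- ===== PORT B =====
-- for i, ln in enumerate(lines): if i > 0 and blankish(ln): out = '\n'.join(prefix); prefix.append(ln)
def strip_footer_py_alt (text : String) : String :=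
  let lines := pvLines text
  ((PySem.List.enumerate lines 0).foldl
    (fun (st : String × List String) p =>
      ((if p.1 > 0 && pvBlankish p.2 then PySem.Str.join "\n" st.2 else st.1),
       st.2 ++ [p.2]))
    (text, [])).1

-- ===== PRECONDITION & SPEC =====
def Spec_strip_footer_py (text : String) (out : String) : Prop := out = strip_footer_py_alt text
instance (text : String) (out : String) : Decidable (Spec_strip_footer_py text out) := by unfold Spec_strip_footer_py; infer_instance

-- ===== CLAIM =====
def Claim_equal_strip_footer_py : Prop := ∀ (text : String), Dom_strip_footer_py text → Spec_strip_footer_py text (strip_footer_py text)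

-- ===== LEMMAS AND PROOFS =====

theorem pvLoopA_nonneg (lines : List String) (i : Nat) : 0 ≤ pvLoopA lines i := by
  induction i with
  | zero => exact le_refl 0
  | succ i ih => simp only [pvLoopA]; split <;> omega

theorem pvLoopA_le (lines : List String) (i : Nat) : pvLoopA lines i ≤ (i : Int) + 1 := by
  induction i with
  | zero => simp [pvLoopA]
  | succ i ih => simp only [pvLoopA]; split <;> push_cast <;> omega

-- pvLoopA only reads indices ≤ i, so a suffix beyond them is irrelevant.
theorem pvLoopA_append (ys zs : List String) (i : Nat) (h : i < ys.length) :
    pvLoopA (ys ++ zs) i = pvLoopA ys i := by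
  induction i with
  | zero => rfl
  | succ i ih =>
    simp only [pvLoopA, List.getD_append _ _ _ _ h]
    exact if_congr Iff.rfl rfl (ih (Nat.lt_of_succ_lt h))

-- A's value, as a function of the line list (definitional unfolding of strip_footer_py).
def pvAForm (text : String) (lines : List String) : String :=
  if pvLoopA lines (lines.length - 1) > 0 then
    PySem.Str.join "\n" (PySem.List.slice lines none (some (pvLoopA lines (lines.length - 1))))
  else text

-- B's fold computes (pvAForm text ys, ys) after consuming ys.
theorem pvFoldB_eq (text : String) (ys : List String) :
    (PySem.List.enumerate ys 0).foldl
      (fun (st : String × List String) p =>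
        ((if p.1 > 0 && pvBlankish p.2 then PySem.Str.join "\n" st.2 else st.1),
         st.2 ++ [p.2]))
      (text, []) = (pvAForm text ys, ys) := by
  induction ys using List.reverseRecOn with
  | nil => simp [PySem.List.enumerate_nil, pvAForm, pvLoopA]
  | append_singleton ys y ih =>
    rw [PySem.List.enumerate_append, List.foldl_append, ih]
    simp only [PySem.List.enumerate_cons, PySem.List.enumerate_nil, List.foldl_cons,
      List.foldl_nil, Prod.mk.injEq]
    refine ⟨?_, by simp⟩
    cases ys with
    | nil =>
      -- index 0: the i > 0 guard is false; and pvAForm text [y] = text since pvLoopA _ 0 = 0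
      simp [pvAForm, pvLoopA]
    | cons a as =>
      have hget : ((a :: as) ++ [y]).getD (as.length + 1) "" = y := by simp [List.getD]
      have hlen : ((a :: as) ++ [y]).length - 1 = as.length + 1 := by simp
      by_cases hy : pvBlankish y
      · -- separator: B overwrites with '\n'.join(prefix); A's loop breaks at index |ys|
        have hA : pvAForm text ((a :: as) ++ [y]) = PySem.Str.join "\n" (a :: as) := by
          have hslice : PySem.List.slice ((a :: as) ++ [y]) none (some ((as.length : Int) + 1))
              = a :: as := by
            rw [show ((as.length : Int) + 1) = (((as.length + 1 : Nat)) : Int) by push_cast; ring,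
              PySem.List.slice_to_natCast]
            simp
          unfold pvAForm
          rw [hlen]
          rw [show pvLoopA ((a :: as) ++ [y]) (as.length + 1)
              = ((as.length : Int) + 1) by rw [pvLoopA, hget, if_pos hy]]
          rw [hslice, if_pos (by positivity)]
        rw [hA, if_pos (by simp [hy])]
      · -- not a separator: B keeps its answer; A's loop skips index |ys|
        have hL : pvLoopA ((a :: as) ++ [y]) (as.length + 1)
            = pvLoopA (a :: as) ((a :: as).length - 1) := by
          rw [pvLoopA, hget, if_neg hy, pvLoopA_append (a :: as) [y] as.length (by simp)]
          rfl
        have hA : pvAForm text ((a :: as) ++ [y]) = pvAForm text (a :: as) := by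
          have h0 : 0 ≤ pvLoopA (a :: as) ((a :: as).length - 1) := pvLoopA_nonneg _ _
          have hle : pvLoopA (a :: as) ((a :: as).length - 1) ≤ ((a :: as).length : Int) := by
            have := pvLoopA_le (a :: as) ((a :: as).length - 1)
            simp only [List.length_cons] at *
            push_cast at *
            omega
          have hslice : PySem.List.slice ((a :: as) ++ [y]) none
                (some (pvLoopA (a :: as) ((a :: as).length - 1)))
              = PySem.List.slice (a :: as) none
                (some (pvLoopA (a :: as) ((a :: as).length - 1))) := by
            rw [PySem.List.slice_to _ h0, PySem.List.slice_to _ h0]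
            rw [List.take_append_of_le_length (by simp at hle ⊢; omega)]
          unfold pvAForm
          rw [hlen, hL, hslice]
        rw [hA, if_neg (by simp [hy])]

-- ===== VERDICT =====
theorem strip_footer_py_spec : Claim_equal_strip_footer_py := by
  intro text _
  show strip_footer_py text = strip_footer_py_alt text
  simp only [strip_footer_py, strip_footer_py_alt, pvFoldB_eq]
  rfl
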